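-- pv_equiv track=rewrite | github.com/Djoystick/AmbientAudioTool | src/ambient_audio_tool/exporter/compiler.py | _collect_transitive_refs
-- ===== SOURCE A (Python) =====
-- def _collect_transitive_refs(condition_id: str, graph: dict[str, set[str]]) -> list[str]:
--     visited: set[str] = set()
--
--     def dfs(node_id: str) -> None:
--         for ref_id in sorted(graph.get(node_id, set())):
--             if ref_id in visited:
--                 continue
--             visited.add(ref_id)
--             dfs(ref_id)
--
--     dfs(condition_id)
--     return sorted(visited)
-- ===== SOURCE B (Python) =====
-- def _collect_transitive_refs(condition_id: str, graph: dict[str, set[str]]) -> list[str]: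
--     visited: set[str] = set()
--     worklist = [condition_id]
--     while worklist:
--         node_id = worklist.pop(0)
--         for ref_id in graph.get(node_id, set()):
--             if ref_id not in visited:
--                 visited.add(ref_id)
--                 worklist.append(ref_id)
--     return sorted(visited)
-- ===== Notes on version B (the rewrite author's own statement) =====
-- stated objective: simpler
-- what changed: Replaces the recursive DFS helper with a mutable visited set by an explicit worklist loop (pop a node, enqueue its unvisited neighbours); condition_id is still not pre-marked, so it appears in the output only when a cycle reaches it.
import Mathlib
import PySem

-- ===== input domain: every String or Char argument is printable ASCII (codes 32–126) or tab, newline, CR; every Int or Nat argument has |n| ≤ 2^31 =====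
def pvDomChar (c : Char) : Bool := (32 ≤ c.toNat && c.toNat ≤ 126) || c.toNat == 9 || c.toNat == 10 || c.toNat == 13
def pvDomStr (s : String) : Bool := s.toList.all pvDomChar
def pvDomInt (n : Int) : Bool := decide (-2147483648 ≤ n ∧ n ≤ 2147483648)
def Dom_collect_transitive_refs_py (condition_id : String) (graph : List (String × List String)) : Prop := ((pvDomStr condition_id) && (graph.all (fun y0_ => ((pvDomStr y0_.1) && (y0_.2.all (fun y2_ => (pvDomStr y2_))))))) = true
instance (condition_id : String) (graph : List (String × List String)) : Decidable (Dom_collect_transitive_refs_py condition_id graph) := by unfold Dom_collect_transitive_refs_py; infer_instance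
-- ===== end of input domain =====

-- B replaces the recursive DFS helper by an explicit worklist loop; the return value is the same sorted list.
-- Both ports use a fuel counter solely to make the traversal total; the proofs show it never runs out.

-- shared lookup helper: graph.get(node, set())
def pvAdj (graph : List (String × List String)) (node : String) : List String :=
  PySem.Dict.getD (PySem.Dict.mk graph) node []

-- ===== PORT A =====
-- dfs(node): for ref_id in sorted(graph.get(node, set())): if ref_id in visited: continue; visited.add(ref_id); dfs(ref_id)
mutual
def pvDfs (graph : List (String × List String)) : Nat → String → List String → List String
  | 0, _, visited => visited
  | fuel+1, node, visited =>
      pvDfsFor graph fuel (PySem.List.sorted (pvAdj graph node) (fun x => x) false) visited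
termination_by fuel _ _ => (fuel, 0)
def pvDfsFor (graph : List (String × List String)) : Nat → List String → List String → List String
  | _, [], visited => visited
  | fuel, r :: rs, visited =>
      if PySem.Set.contains visited r then pvDfsFor graph fuel rs visited
      else pvDfsFor graph fuel rs (pvDfs graph fuel r (PySem.Set.add visited r))
termination_by fuel refs _ => (fuel, refs.length + 1)
end

def collect_transitive_refs_py (condition_id : String) (graph : List (String × List String)) : List String :=
  PySem.List.sorted
    (pvDfs graph ((graph.map Prod.snd).flatten.length + 1) condition_id PySem.Set.empty)
    (fun x => x) false

-- ===== PORT B =====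
-- while worklist: node = worklist.pop(0); for ref in graph.get(node, set()): if ref not in visited: visited.add(ref); worklist.append(ref)
def pvStep (p : List String × List String) (r : String) : List String × List String :=
  if PySem.Set.contains p.1 r then p else (PySem.Set.add p.1 r, p.2 ++ [r])

def pvLoop (graph : List (String × List String)) : Nat → List String → List String → List String
  | 0, visited, _ => visited
  | _+1, visited, [] => visited
  | fuel+1, visited, node :: rest =>
      let p := (pvAdj graph node).foldl pvStep (visited, rest)
      pvLoop graph fuel p.1 p.2

def collect_transitive_refs_py_alt (condition_id : String) (graph : List (String × List String)) : List String :=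
  PySem.List.sorted
    (pvLoop graph ((graph.map Prod.snd).flatten.length + 1) PySem.Set.empty [condition_id])
    (fun x => x) false

-- ===== PRECONDITION & SPEC =====
def Spec_collect_transitive_refs_py (condition_id : String) (graph : List (String × List String)) (out : List String) : Prop := out = collect_transitive_refs_py_alt condition_id graph
instance (condition_id : String) (graph : List (String × List String)) (out : List String) : Decidable (Spec_collect_transitive_refs_py condition_id graph out) := by unfold Spec_collect_transitive_refs_py; infer_instance

-- ===== CLAIM (what is proved, stated in full; the proofs are below) =====
def Claim_equal_collect_transitive_refs_py : Prop := ∀ (condition_id : String) (graph : List (String × List String)), Dom_collect_transitive_refs_py condition_id graph → Spec_collect_transitive_refs_py condition_id graph (collect_transitive_refs_py condition_id graph)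

-- ===== LEMMAS AND PROOFS =====

-- the edge relation of the graph, and the universe of possible new nodes (all values)
def pvE (graph : List (String × List String)) (x y : String) : Prop := y ∈ pvAdj graph x

def pvUF (graph : List (String × List String)) : Finset String :=
  ((graph.map Prod.snd).flatten).toFinset

def pvM (graph : List (String × List String)) (vis : List String) : Nat :=
  (pvUF graph \ vis.toFinset).card

theorem mem_pvAdj_flatten (graph : List (String × List String)) (x y : String)
    (h : y ∈ pvAdj graph x) : y ∈ (graph.map Prod.snd).flatten := by
  induction graph with
  | nil => simp [pvAdj, PySem.Dict.getD, PySem.Dict.get?] at h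
  | cons p rest ih =>
    simp only [pvAdj, PySem.Dict.getD_eq_get?_getD] at h ih
    rw [PySem.Dict.get?_mk_cons] at h
    by_cases hk : p.1 == x
    · simp [hk] at h
      simp [List.mem_flatten]
      exact Or.inl h
    · simp [hk] at h
      simp only [List.map_cons, List.flatten_cons, List.mem_append]
      exact Or.inr (ih h)

theorem pvM_add (graph : List (String × List String)) (vis : List String) (r : String)
    (hU : r ∈ pvUF graph) (hv : r ∉ vis) : pvM graph (vis ++ [r]) + 1 = pvM graph vis := by
  unfold pvM
  have hset : pvUF graph \ (vis ++ [r]).toFinset = (pvUF graph \ vis.toFinset).erase r := by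
    ext a; simp [List.toFinset_append, Finset.mem_erase]; tauto
  rw [hset, Finset.card_erase_of_mem (by simp [Finset.mem_sdiff, hU, hv])]
  have hpos : 0 < (pvUF graph \ vis.toFinset).card :=
    Finset.card_pos.2 ⟨r, by simp [Finset.mem_sdiff, hU, hv]⟩
  omega

theorem pvM_mono (graph : List (String × List String)) (vis vis' : List String)
    (h : ∀ x ∈ vis, x ∈ vis') : pvM graph vis' ≤ pvM graph vis := by
  apply Finset.card_le_card
  intro a ha
  simp only [Finset.mem_sdiff, List.mem_toFinset] at ha ⊢
  exact ⟨ha.1, fun hm => ha.2 (h a hm)⟩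

theorem pvM_append (graph : List (String × List String)) (ext : List String) :
    ∀ vis, ext.Nodup → (∀ y ∈ ext, y ∈ pvUF graph ∧ y ∉ vis) →
    pvM graph (vis ++ ext) + ext.length = pvM graph vis := by
  induction ext with
  | nil => intro vis _ _; simp
  | cons r rs ih =>
    intro vis hnd hy
    have h1 : pvM graph ((vis ++ [r]) ++ rs) + rs.length = pvM graph (vis ++ [r]) := by
      apply ih
      · exact hnd.of_cons
      · intro y hyy
        refine ⟨(hy y (by simp [hyy])).1, ?_⟩
        simp only [List.mem_append, List.mem_singleton]
        rintro (h | h)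
        · exact (hy y (by simp [hyy])).2 h
        · subst h; exact (List.nodup_cons.1 hnd).1 hyy
    have h2 := pvM_add graph vis r (hy r (by simp)).1 (hy r (by simp)).2
    have h3 : vis ++ r :: rs = (vis ++ [r]) ++ rs := by simp
    rw [h3]
    simp only [List.length_cons]
    omega

theorem pvM_nil_le (graph : List (String × List String)) :
    pvM graph [] ≤ (graph.map Prod.snd).flatten.length := by
  unfold pvM
  simp only [List.toFinset_nil, Finset.sdiff_empty]
  exact List.toFinset_card_le _

-- ---------- Port A: DFS invariants ----------

def pvAuxOK (graph : List (String × List String)) (fuel : Nat) : Prop :=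
  ∀ node vis,
    (∃ ext, pvDfs graph fuel node vis = vis ++ ext) ∧
    (vis.Nodup → (pvDfs graph fuel node vis).Nodup) ∧
    (∀ y ∈ pvDfs graph fuel node vis, y ∈ vis ∨ Relation.TransGen (pvE graph) node y) ∧
    (pvM graph vis + 1 ≤ fuel →
      (∀ z ∈ pvAdj graph node, z ∈ pvDfs graph fuel node vis) ∧
      (∀ y ∈ pvDfs graph fuel node vis, y ∉ vis →
        ∀ z ∈ pvAdj graph y, z ∈ pvDfs graph fuel node vis))

def pvForOK (graph : List (String × List String)) (fuel : Nat) : Prop :=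
  ∀ refs vis,
    (∃ ext, pvDfsFor graph fuel refs vis = vis ++ ext) ∧
    (vis.Nodup → (pvDfsFor graph fuel refs vis).Nodup) ∧
    (∀ y ∈ pvDfsFor graph fuel refs vis,
        y ∈ vis ∨ ∃ r ∈ refs, y = r ∨ Relation.TransGen (pvE graph) r y) ∧
    ((∀ r ∈ refs, r ∈ pvUF graph) → pvM graph vis ≤ fuel →
      (∀ r ∈ refs, r ∈ pvDfsFor graph fuel refs vis) ∧
      (∀ y ∈ pvDfsFor graph fuel refs vis, y ∉ vis →
        ∀ z ∈ pvAdj graph y, z ∈ pvDfsFor graph fuel refs vis))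

theorem pvFor_of_aux (graph : List (String × List String)) (fuel : Nat)
    (hA : pvAuxOK graph fuel) : pvForOK graph fuel := by
  intro refs
  induction refs with
  | nil =>
    intro vis
    refine ⟨⟨[], by simp [pvDfsFor]⟩, fun h => by simpa [pvDfsFor] using h,
      fun y hy => Or.inl (by simpa [pvDfsFor] using hy), fun _ _ => ⟨by simp, ?_⟩⟩
    intro y hy hyv
    exact absurd (by simpa [pvDfsFor] using hy) hyv
  | cons r rs ih =>
    intro vis
    by_cases hr : r ∈ vis
    · have hstep : pvDfsFor graph fuel (r :: rs) vis = pvDfsFor graph fuel rs vis := by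
        simp [pvDfsFor, hr]
      obtain ⟨⟨ext, g1⟩, g2, g3, g4⟩ := ih vis
      rw [hstep]
      refine ⟨⟨ext, g1⟩, g2, ?_, ?_⟩
      · intro y hy
        rcases g3 y hy with h | ⟨r', hr', h⟩
        · exact Or.inl h
        · exact Or.inr ⟨r', List.mem_cons_of_mem _ hr', h⟩
      · intro hrefs hm
        obtain ⟨c1, c2⟩ := g4 (fun a ha => hrefs a (List.mem_cons_of_mem _ ha)) hm
        refine ⟨?_, c2⟩
        intro a ha
        rcases List.mem_cons.1 ha with h | h
        · subst h; rw [g1]; exact List.mem_append_left _ hr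
        · exact c1 a h
    · have hstep : pvDfsFor graph fuel (r :: rs) vis =
          pvDfsFor graph fuel rs (pvDfs graph fuel r (vis ++ [r])) := by
        simp [pvDfsFor, hr, PySem.Set.add]
      obtain ⟨⟨extA, a1⟩, a2, a3, a4⟩ := hA r (vis ++ [r])
      obtain ⟨⟨extG, g1⟩, g2, g3, g4⟩ := ih (pvDfs graph fuel r (vis ++ [r]))
      have hsubV : ∀ x ∈ vis ++ [r], x ∈ pvDfs graph fuel r (vis ++ [r]) := by
        intro x hx; rw [a1]; exact List.mem_append_left _ hx
      have hsubR : ∀ x ∈ pvDfs graph fuel r (vis ++ [r]),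
          x ∈ pvDfsFor graph fuel rs (pvDfs graph fuel r (vis ++ [r])) := by
        intro x hx; rw [g1]; exact List.mem_append_left _ hx
      rw [hstep]
      refine ⟨⟨[r] ++ extA ++ extG, by rw [g1, a1]; simp⟩, ?_, ?_, ?_⟩
      · intro hnd
        exact g2 (a2 (by simp [List.nodup_append, hnd]; exact fun a ha h => hr (h ▸ ha)))
      · intro y hy
        rcases g3 y hy with h | ⟨r', hr', h⟩
        · rcases a3 y h with h' | h'
          · rcases List.mem_append.1 h' with h'' | h''
            · exact Or.inl h''
            · exact Or.inr ⟨r, List.mem_cons_self, Or.inl (by simpa using h'')⟩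
          · exact Or.inr ⟨r, List.mem_cons_self, Or.inr h'⟩
        · exact Or.inr ⟨r', List.mem_cons_of_mem _ hr', h⟩
      · intro hrefs hm
        have rU : r ∈ pvUF graph := hrefs r List.mem_cons_self
        have hadd := pvM_add graph vis r rU hr
        obtain ⟨adjr, clA⟩ := a4 (by omega)
        have hmV : pvM graph (pvDfs graph fuel r (vis ++ [r])) ≤ fuel := by
          have := pvM_mono graph (vis ++ [r]) _ hsubV
          omega
        obtain ⟨c1, c2⟩ := g4 (fun a ha => hrefs a (List.mem_cons_of_mem _ ha)) hmV
        refine ⟨?_, ?_⟩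
        · intro a ha
          rcases List.mem_cons.1 ha with h | h
          · subst h; exact hsubR _ (hsubV _ (by simp))
          · exact c1 a h
        · intro y hy hyv z hz
          by_cases hyV : y ∈ pvDfs graph fuel r (vis ++ [r])
          · by_cases hyv' : y ∈ vis ++ [r]
            · have hyr : y = r := by
                rcases List.mem_append.1 hyv' with h | h
                · exact absurd h hyv
                · simpa using h
              subst hyr
              exact hsubR _ (adjr z hz)
            · exact hsubR _ (clA y hyV hyv' z hz)
          · exact c2 y hy hyV z hz

theorem pvAux_zero (graph : List (String × List String)) : pvAuxOK graph 0 := by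
  intro node vis
  refine ⟨⟨[], by simp [pvDfs]⟩, fun h => by simpa [pvDfs] using h,
    fun y hy => Or.inl (by simpa [pvDfs] using hy), fun hf => by omega⟩

theorem pvAux_succ (graph : List (String × List String)) (fuel : Nat)
    (hG : pvForOK graph fuel) : pvAuxOK graph (fuel+1) := by
  intro node vis
  have hstep : pvDfs graph (fuel+1) node vis =
      pvDfsFor graph fuel (PySem.List.sorted (pvAdj graph node) (fun x => x) false) vis := by
    simp [pvDfs]
  obtain ⟨⟨ext, g1⟩, g2, g3, g4⟩ := hG (PySem.List.sorted (pvAdj graph node) (fun x => x) false) vis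
  rw [hstep]
  refine ⟨⟨ext, g1⟩, g2, ?_, ?_⟩
  · intro y hy
    rcases g3 y hy with h | ⟨r', hr', h⟩
    · exact Or.inl h
    · have hadj : pvE graph node r' := (PySem.List.mem_sorted _ _ _ _).1 hr'
      rcases h with h | h
      · exact Or.inr (h ▸ Relation.TransGen.single hadj)
      · exact Or.inr (Relation.TransGen.head hadj h)
  · intro hm
    have hsub : ∀ a ∈ PySem.List.sorted (pvAdj graph node) (fun x => x) false, a ∈ pvUF graph := by
      intro a ha
      exact List.mem_toFinset.2
        (mem_pvAdj_flatten graph node a ((PySem.List.mem_sorted _ _ _ _).1 ha))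
    obtain ⟨c1, c2⟩ := g4 hsub (by omega)
    refine ⟨?_, c2⟩
    intro z hz
    exact c1 z ((PySem.List.mem_sorted _ _ _ _).2 hz)

theorem pvAux_all (graph : List (String × List String)) (fuel : Nat) : pvAuxOK graph fuel := by
  induction fuel with
  | zero => exact pvAux_zero graph
  | succ f ih => exact pvAux_succ graph f (pvFor_of_aux graph f ih)

-- characterisation of A's visited set
theorem pvDfs_char (graph : List (String × List String)) (cid : String) :
    (pvDfs graph ((graph.map Prod.snd).flatten.length + 1) cid []).Nodup ∧
    (∀ y, y ∈ pvDfs graph ((graph.map Prod.snd).flatten.length + 1) cid [] ↔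
      Relation.TransGen (pvE graph) cid y) := by
  obtain ⟨⟨ext, a1⟩, a2, a3, a4⟩ :=
    pvAux_all graph ((graph.map Prod.snd).flatten.length + 1) cid []
  obtain ⟨adjc, clos⟩ := a4 (by have := pvM_nil_le graph; omega)
  refine ⟨a2 List.nodup_nil, fun y => ⟨?_, ?_⟩⟩
  · intro hy
    rcases a3 y hy with h | h
    · simp at h
    · exact h
  · intro htg
    induction htg with
    | single h => exact adjc _ h
    | tail _ hbc ih => exact clos _ ih (by simp) _ hbc

-- ---------- Port B: worklist invariants ----------

theorem pvFold_char (graph : List (String × List String)) (refs : List String) :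
    ∀ vis st, ∃ ext,
      (refs.foldl pvStep (vis, st)).1 = vis ++ ext ∧
      (refs.foldl pvStep (vis, st)).2 = st ++ ext ∧
      ext.Nodup ∧ (∀ y ∈ ext, y ∈ refs ∧ y ∉ vis) ∧
      (∀ r ∈ refs, r ∈ vis ++ ext) := by
  induction refs with
  | nil => intro vis st; exact ⟨[], by simp⟩
  | cons r rs ih =>
    intro vis st
    by_cases hr : r ∈ vis
    · have hstep : pvStep (vis, st) r = (vis, st) := by
        simp [pvStep, hr]
      obtain ⟨ext, h1, h2, h3, h4, h5⟩ := ih vis st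
      refine ⟨ext, ?_, ?_, h3, ?_, ?_⟩
      · simpa [List.foldl_cons, hstep] using h1
      · simpa [List.foldl_cons, hstep] using h2
      · intro y hy; exact ⟨List.mem_cons_of_mem _ (h4 y hy).1, (h4 y hy).2⟩
      · intro r' hr'
        rcases List.mem_cons.1 hr' with h | h
        · subst h; simp [hr]
        · exact h5 r' h
    · have hstep : pvStep (vis, st) r = (vis ++ [r], st ++ [r]) := by
        simp [pvStep, hr, PySem.Set.add]
      obtain ⟨ext, h1, h2, h3, h4, h5⟩ := ih (vis ++ [r]) (st ++ [r])
      refine ⟨r :: ext, ?_, ?_, ?_, ?_, ?_⟩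
      · simpa [List.foldl_cons, hstep] using h1
      · simpa [List.foldl_cons, hstep] using h2
      · exact List.nodup_cons.2 ⟨fun hm => by simpa [hr] using (h4 r hm).2, h3⟩
      · intro y hy
        rcases List.mem_cons.1 hy with h | h
        · subst h; exact ⟨List.mem_cons_self, hr⟩
        · refine ⟨List.mem_cons_of_mem _ (h4 y h).1, fun hm => (h4 y h).2 (by simp [hm])⟩
      · intro r' hr'
        rcases List.mem_cons.1 hr' with h | h
        · subst h; simp
        · have := h5 r' h
          simp only [List.mem_append, List.mem_cons] at this ⊢
          tauto

theorem pvLoop_main (graph : List (String × List String)) (cid : String) :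
    ∀ (fuel : Nat) (vis st : List String),
      vis.Nodup →
      (∀ y ∈ vis, Relation.TransGen (pvE graph) cid y) →
      (∀ y ∈ st, y = cid ∨ y ∈ vis) →
      (∀ y, (y = cid ∨ y ∈ vis) → y ∈ st ∨ (∀ z ∈ pvAdj graph y, z ∈ vis)) →
      st.length + pvM graph vis ≤ fuel →
      (pvLoop graph fuel vis st).Nodup ∧
      (∀ y ∈ pvLoop graph fuel vis st, Relation.TransGen (pvE graph) cid y) ∧
      (∀ y, (y = cid ∨ y ∈ pvLoop graph fuel vis st) →
        ∀ z ∈ pvAdj graph y, z ∈ pvLoop graph fuel vis st) := by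
  intro fuel
  induction fuel with
  | zero =>
    intro vis st h1 h2 h3 h4 h5
    have hst : st = [] := by
      cases st with
      | nil => rfl
      | cons a t => simp at h5
    subst hst
    refine ⟨h1, h2, ?_⟩
    intro y hy z hz
    rcases h4 y (by simpa [pvLoop] using hy) with h | h
    · simp at h
    · exact h z hz
  | succ f ih =>
    intro vis st h1 h2 h3 h4 h5
    cases st with
    | nil =>
      refine ⟨h1, h2, ?_⟩
      intro y hy z hz
      rcases h4 y (by simpa [pvLoop] using hy) with h | h
      · simp at h
      · exact h z hz
    | cons node rest =>
      obtain ⟨ext, e1, e2, e3, e4, e5⟩ := pvFold_char graph (pvAdj graph node) vis rest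
      have heq : pvLoop graph (f+1) vis (node :: rest) =
          pvLoop graph f ((pvAdj graph node).foldl pvStep (vis, rest)).1
            ((pvAdj graph node).foldl pvStep (vis, rest)).2 := rfl
      have hUF : ∀ y ∈ ext, y ∈ pvUF graph := by
        intro y hy
        exact List.mem_toFinset.2 (mem_pvAdj_flatten graph node y (e4 y hy).1)
      have h1' : (vis ++ ext).Nodup := by
        rw [List.nodup_append]
        exact ⟨h1, e3, fun a ha b hb hab => (e4 b hb).2 (hab ▸ ha)⟩
      have h2' : ∀ y ∈ vis ++ ext, Relation.TransGen (pvE graph) cid y := by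
        intro y hy
        rcases List.mem_append.1 hy with h | h
        · exact h2 y h
        · have hedge : pvE graph node y := (e4 y h).1
          rcases h3 node List.mem_cons_self with hn | hn
          · exact hn ▸ Relation.TransGen.single hedge
          · exact (h2 node hn).tail hedge
      have h3' : ∀ y ∈ rest ++ ext, y = cid ∨ y ∈ vis ++ ext := by
        intro y hy
        rcases List.mem_append.1 hy with h | h
        · rcases h3 y (List.mem_cons_of_mem _ h) with h' | h'
          · exact Or.inl h'
          · exact Or.inr (List.mem_append_left _ h')
        · exact Or.inr (List.mem_append_right _ h)
      have h4' : ∀ y, (y = cid ∨ y ∈ vis ++ ext) →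
          y ∈ rest ++ ext ∨ (∀ z ∈ pvAdj graph y, z ∈ vis ++ ext) := by
        intro y hy
        by_cases hye : y ∈ ext
        · exact Or.inl (List.mem_append_right _ hye)
        · have hy' : y = cid ∨ y ∈ vis := by
            rcases hy with h | h
            · exact Or.inl h
            · rcases List.mem_append.1 h with h' | h'
              · exact Or.inr h'
              · exact absurd h' hye
          rcases h4 y hy' with h | h
          · rcases List.mem_cons.1 h with h' | h'
            · subst h'; exact Or.inr e5
            · exact Or.inl (List.mem_append_left _ h')
          · exact Or.inr (fun z hz => List.mem_append_left _ (h z hz))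
      have h5' : (rest ++ ext).length + pvM graph (vis ++ ext) ≤ f := by
        have hm := pvM_append graph ext vis e3 (fun y hy => ⟨hUF y hy, (e4 y hy).2⟩)
        simp only [List.length_append, List.length_cons] at h5 ⊢
        omega
      rw [heq, e1, e2]
      exact ih (vis ++ ext) (rest ++ ext) h1' h2' h3' h4' h5'

theorem pvLoop_char (graph : List (String × List String)) (cid : String) :
    (pvLoop graph ((graph.map Prod.snd).flatten.length + 1) [] [cid]).Nodup ∧
    (∀ y, y ∈ pvLoop graph ((graph.map Prod.snd).flatten.length + 1) [] [cid] ↔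
      Relation.TransGen (pvE graph) cid y) := by
  obtain ⟨hn, hsnd, hcl⟩ := pvLoop_main graph cid ((graph.map Prod.snd).flatten.length + 1) [] [cid]
    List.nodup_nil (by simp)
    (fun y hy => Or.inl (by simpa using hy))
    (fun y hy => Or.inl (by simpa using hy))
    (by have := pvM_nil_le graph; simp only [List.length_cons, List.length_nil]; omega)
  refine ⟨hn, fun y => ⟨hsnd y, ?_⟩⟩
  intro htg
  induction htg with
  | single h => exact hcl cid (Or.inl rfl) _ h
  | tail _ hbc ih => exact hcl _ (Or.inr ih) _ hbc

-- ===== VERDICT (by name: the statement is the Claim_ definition above) =====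
theorem collect_transitive_refs_py_spec : Claim_equal_collect_transitive_refs_py := by
  intro cid graph _
  unfold Spec_collect_transitive_refs_py collect_transitive_refs_py collect_transitive_refs_py_alt
  obtain ⟨hA1, hA2⟩ := pvDfs_char graph cid
  obtain ⟨hB1, hB2⟩ := pvLoop_char graph cid
  have hperm : (pvDfs graph ((graph.map Prod.snd).flatten.length + 1) cid []).Perm
      (pvLoop graph ((graph.map Prod.snd).flatten.length + 1) [] [cid]) := by
    rw [List.perm_ext_iff_of_nodup hA1 hB1]
    intro a; rw [hA2 a, hB2 a]
  exact PySem.List.sorted_eq_sorted_of_perm _ _ _ Function.injective_id hperm
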